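-- pv_equiv track=rewrite | github.com/DanielPD/smartplay_data_processing | compute_closeness_scores.py | calc_cumulative_closeness_score
-- ===== SOURCE A (Python) =====
-- SMARTWATCH_BT_WHITELIST = ['54:08:3B:C4:FC:64','51:62:7F:43:DA:1A','3E:EE:A1:BF:47:DE','29:5A:3F:E1:97:2B','74:40:BB:C2:DF:46','28:D3:3E:0A:80:93','4E:8A:2B:9E:F9:42']
--
-- def calc_cumulative_closeness_score(data):
--     closeness_scores = {}
--     for row in data:
--         for device, signal_strength in row['devices'].items():
--             if device not in SMARTWATCH_BT_WHITELIST: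
--                 continue
--
--             if device in closeness_scores:
--                 closeness_scores[device]["RSSI"] += signal_strength
--                 closeness_scores[device]["TIR"] += 1
--             else:
--                 closeness_scores.update(
--                     {
--                         device: {
--                             "RSSI": signal_strength,
--                             "TIR": 1
--                         }
--                     }
--                 )
--     return closeness_scores
-- ===== SOURCE B (Python) =====
-- SMARTWATCH_BT_WHITELIST = ['54:08:3B:C4:FC:64','51:62:7F:43:DA:1A','3E:EE:A1:BF:47:DE','29:5A:3F:E1:97:2B','74:40:BB:C2:DF:46','28:D3:3E:0A:80:93','4E:8A:2B:9E:F9:42']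
--
-- def calc_cumulative_closeness_score(data):
--     # collect-then-reduce: first gather every whitelisted reading per device,
--     # then reduce each list to its sum (RSSI) and length (TIR)
--     readings = {}
--     for row in data:
--         for device, signal_strength in row['devices'].items():
--             if device in SMARTWATCH_BT_WHITELIST:
--                 readings.setdefault(device, []).append(signal_strength)
--     return {device: {"RSSI": sum(ss), "TIR": len(ss)} for device, ss in readings.items()}
-- ===== Notes on version B (the rewrite author's own statement) =====
-- stated objective: simpler
-- what changed: A accumulates RSSI/TIR simultaneously with an in-dict presence branch per reading; B first collects each whitelisted device's signal strengths into per-device lists (collect pass), then reduces each list to {'RSSI': sum, 'TIR': len} in a comprehension.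
-- outside the precondition, e.g. on calc_cumulative_closeness_score([{}]): A raises KeyError, B raises KeyError
import Mathlib
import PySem

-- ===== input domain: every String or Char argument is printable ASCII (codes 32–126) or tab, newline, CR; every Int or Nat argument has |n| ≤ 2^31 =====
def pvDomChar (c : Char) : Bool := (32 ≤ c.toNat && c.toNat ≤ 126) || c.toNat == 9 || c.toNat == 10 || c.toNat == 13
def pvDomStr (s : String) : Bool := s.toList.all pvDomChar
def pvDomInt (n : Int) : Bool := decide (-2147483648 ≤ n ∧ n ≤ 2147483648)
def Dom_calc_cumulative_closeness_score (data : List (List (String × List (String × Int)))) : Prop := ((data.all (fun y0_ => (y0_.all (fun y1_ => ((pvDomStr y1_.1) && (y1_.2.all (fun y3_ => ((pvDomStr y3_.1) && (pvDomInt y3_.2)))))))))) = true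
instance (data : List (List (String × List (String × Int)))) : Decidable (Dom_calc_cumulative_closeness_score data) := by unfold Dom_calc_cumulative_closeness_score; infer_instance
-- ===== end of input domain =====

-- B replaces A's simultaneous RSSI/TIR accumulation (presence-branch per reading) by a
-- collect-then-reduce pass: gather per-device signal lists, then emit sum/length (objective: simpler).

def pvWL : List String := ["54:08:3B:C4:FC:64","51:62:7F:43:DA:1A","3E:EE:A1:BF:47:DE","29:5A:3F:E1:97:2B","74:40:BB:C2:DF:46","28:D3:3E:0A:80:93","4E:8A:2B:9E:F9:42"]

-- ===== PORT A =====
-- loop body of A's inner 'for device, signal_strength in row["devices"].items()'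
def pvStepA (scores : PySem.Dict String (PySem.Dict String Int)) (p : String × Int) :
    PySem.Dict String (PySem.Dict String Int) :=
  if pvWL.contains p.1 = false then scores            -- 'continue'
  else if scores.contains p.1 then
    -- closeness_scores[device]["RSSI"] += ss; closeness_scores[device]["TIR"] += 1
    scores.insert p.1 (((scores.getD p.1 PySem.Dict.empty).modify "RSSI" 0 (· + p.2)).modify "TIR" 0 (· + 1))
  else
    scores.insert p.1 (PySem.Dict.ofList [("RSSI", p.2), ("TIR", 1)])

-- row['devices'] raises KeyError when absent; Pre_ excludes that, so getD's default is never the result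
def calc_cumulative_closeness_score (data : List (List (String × List (String × Int)))) : List (String × List (String × Int)) :=
  (data.foldl (fun scores row =>
      ((PySem.Dict.ofList ((PySem.Dict.ofList row).getD "devices" [])).items).foldl pvStepA scores)
    PySem.Dict.empty).items.map (fun q => (q.1, q.2.items))

-- ===== PORT B =====
-- loop body of B's collect pass: readings.setdefault(device, []).append(signal_strength)
def pvStepB (r : PySem.Dict String (List Int)) (p : String × Int) : PySem.Dict String (List Int) :=
  if pvWL.contains p.1 then r.modify p.1 [] (· ++ [p.2]) else r

def calc_cumulative_closeness_score_alt (data : List (List (String × List (String × Int)))) : List (String × List (String × Int)) :=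
  (data.foldl (fun r row =>
      ((PySem.Dict.ofList ((PySem.Dict.ofList row).getD "devices" [])).items).foldl pvStepB r)
    PySem.Dict.empty).items.map (fun q => (q.1, [("RSSI", q.2.sum), ("TIR", (q.2.length : Int))]))

-- ===== PRECONDITION & SPEC =====
-- Pre_ excludes exactly the rows without a 'devices' key, on which Python A raises KeyError
def Pre_calc_cumulative_closeness_score (data : List (List (String × List (String × Int)))) : Prop :=
  (data.all (fun row => row.any (fun p => p.1 == "devices"))) = true
instance (data : List (List (String × List (String × Int)))) : Decidable (Pre_calc_cumulative_closeness_score data) := by unfold Pre_calc_cumulative_closeness_score; infer_instance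
def pvWitness_calc_cumulative_closeness_score : (List (List (String × List (String × Int)))) :=
  [[("devices", [("54:08:3B:C4:FC:64", -50), ("zz", 3)])]]
def Spec_calc_cumulative_closeness_score (data : List (List (String × List (String × Int)))) (out : List (String × List (String × Int))) : Prop := out = calc_cumulative_closeness_score_alt data
instance (data : List (List (String × List (String × Int)))) (out : List (String × List (String × Int))) : Decidable (Spec_calc_cumulative_closeness_score data out) := by unfold Spec_calc_cumulative_closeness_score; infer_instance

-- ===== CLAIM (what is proved, stated in full; the proofs are below) =====
def Claim_equal_calc_cumulative_closeness_score : Prop := ∀ (data : List (List (String × List (String × Int)))), Dom_calc_cumulative_closeness_score data → Pre_calc_cumulative_closeness_score data → Spec_calc_cumulative_closeness_score data (calc_cumulative_closeness_score data)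

-- ===== LEMMAS AND PROOFS =====

-- A's accumulator entry for a device holding list ss of readings
def pvF (q : String × List Int) : String × PySem.Dict String Int :=
  (q.1, PySem.Dict.mk [("RSSI", q.2.sum), ("TIR", (q.2.length : Int))])

def pvInv (sc : PySem.Dict String (PySem.Dict String Int)) (r : PySem.Dict String (List Int)) : Prop :=
  sc.items = r.items.map pvF ∧ r.keys.Nodup

theorem pvInner_update (a b s : Int) :
    ((PySem.Dict.mk [("RSSI",a),("TIR",b)]).modify "RSSI" 0 (· + s)).modify "TIR" 0 (· + 1)
      = PySem.Dict.mk [("RSSI",a+s),("TIR",b+1)] := by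
  simp [PySem.Dict.modify, PySem.Dict.insert, PySem.Dict.contains, PySem.Dict.getD, PySem.Dict.get?]

theorem pvOfList_two (s : Int) :
    PySem.Dict.ofList [("RSSI", s), ("TIR", (1:Int))] = PySem.Dict.mk [("RSSI",s),("TIR",1)] := by
  simp [PySem.Dict.ofList, PySem.Dict.update, PySem.Dict.empty, PySem.Dict.insert, PySem.Dict.contains]

theorem pvContains_of_inv {sc r} (h : pvInv sc r) (k : String) :
    sc.contains k = r.contains k := by
  simp [PySem.Dict.contains, h.1, List.any_map, Function.comp_def, pvF]

theorem pvStep_inv {sc r} (h : pvInv sc r) (p : String × Int) :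
    pvInv (pvStepA sc p) (pvStepB r p) := by
  obtain ⟨hitems, hnd⟩ := h
  unfold pvStepA pvStepB
  by_cases hw : pvWL.contains p.1
  · simp only [hw, Bool.true_eq_false, if_false, if_true]
    rw [pvContains_of_inv ⟨hitems, hnd⟩]
    by_cases hc : r.contains p.1
    · simp only [hc, if_true]
      -- existing key: both sides replace the entry at p.1
      have hscc : sc.contains p.1 = true := by rw [pvContains_of_inv ⟨hitems, hnd⟩]; exact hc
      have hss : (r.modify p.1 [] (· ++ [p.2])) = r.insert p.1 (r.getD p.1 [] ++ [p.2]) := rfl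
      rw [hss]
      have hget : sc.getD p.1 PySem.Dict.empty
          = PySem.Dict.mk [("RSSI", (r.getD p.1 []).sum), ("TIR", ((r.getD p.1 []).length : Int))] := by
        have hex : ∃ v, r.get? p.1 = some v := by
          cases hv : r.get? p.1 with
          | none =>
            exfalso
            have := PySem.Dict.contains_eq_isSome_get? r p.1
            rw [hv] at this; simp [this] at hc
          | some v => exact ⟨v, rfl⟩
        obtain ⟨v, hv⟩ := hex
        have hmem : (p.1, v) ∈ r.items := PySem.Dict.mem_items_of_get?_eq_some _ hv
        have hmem' : (p.1, (pvF (p.1, v)).2) ∈ sc.items := by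
          rw [hitems]; exact List.mem_map_of_mem hmem
        have hsnd : sc.keys.Nodup := by
          have hk : sc.keys = r.keys := by
            simp only [PySem.Dict.keys, hitems, List.map_map]; rfl
          rw [hk]; exact hnd
        have hscget := PySem.Dict.getD_of_mem_items sc hmem' hsnd PySem.Dict.empty
        have hrget : r.getD p.1 [] = v := PySem.Dict.getD_of_mem_items r hmem hnd []
        rw [hscget, hrget]; rfl
      rw [hget, pvInner_update]
      constructor
      · rw [PySem.Dict.items_insert_of_contains _ _ hscc,
            PySem.Dict.items_insert_of_contains _ _ hc, hitems, List.map_map, List.map_map]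
        apply List.map_congr_left
        intro q hq
        by_cases hqk : q.1 = p.1
        · have hq' : (p.1, q.2) ∈ r.items := by rw [← hqk]; simpa using hq
          have hv : r.getD p.1 [] = q.2 := PySem.Dict.getD_of_mem_items r hq' hnd []
          simp [pvF, hqk, hv]
        · simp [pvF, hqk]
      · rw [PySem.Dict.keys_insert_of_contains _ _ hc]; exact hnd
    · have hc' : r.contains p.1 = false := by simpa using hc
      simp only [hc', Bool.false_eq_true, if_false]
      have hscc : sc.contains p.1 = false := by rw [pvContains_of_inv ⟨hitems, hnd⟩]; exact hc'
      have hrm : (r.modify p.1 [] (· ++ [p.2])) = r.insert p.1 [p.2] := by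
        simp [PySem.Dict.modify, PySem.Dict.getD_of_not_contains _ _ hc']
      rw [hrm]
      constructor
      · rw [PySem.Dict.items_insert_of_not_contains _ _ hscc,
            PySem.Dict.items_insert_of_not_contains _ _ hc', hitems, List.map_append]
        simp [pvF, pvOfList_two]
      · exact PySem.Dict.nodup_keys_insert _ _ _ hnd
  · have hw' : pvWL.contains p.1 = false := by simpa using hw
    simp only [hw', if_true]
    exact ⟨hitems, hnd⟩

theorem pvInv_foldl_pairs (l : List (String × Int)) :
    ∀ sc r, pvInv sc r → pvInv (l.foldl pvStepA sc) (l.foldl pvStepB r) := by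
  induction l with
  | nil => intro sc r h; exact h
  | cons p t ih => intro sc r h; exact ih _ _ (pvStep_inv h p)

theorem pvInv_foldl_data (data : List (List (String × List (String × Int)))) :
    ∀ sc r, pvInv sc r →
      pvInv (data.foldl (fun sc row =>
              ((PySem.Dict.ofList ((PySem.Dict.ofList row).getD "devices" [])).items).foldl pvStepA sc) sc)
            (data.foldl (fun r row =>
              ((PySem.Dict.ofList ((PySem.Dict.ofList row).getD "devices" [])).items).foldl pvStepB r) r) := by
  induction data with
  | nil => intro sc r h; exact h
  | cons row t ih => intro sc r h; exact ih _ _ (pvInv_foldl_pairs _ _ _ h)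

-- ===== VERDICT (by name: the statement is the Claim_ definition above) =====
theorem calc_cumulative_closeness_score_spec : Claim_equal_calc_cumulative_closeness_score := by
  intro data _hdom _hpre
  unfold Spec_calc_cumulative_closeness_score calc_cumulative_closeness_score calc_cumulative_closeness_score_alt
  have h0 : pvInv PySem.Dict.empty PySem.Dict.empty := by
    constructor <;> simp [PySem.Dict.empty, PySem.Dict.keys]
  have h := pvInv_foldl_data data PySem.Dict.empty PySem.Dict.empty h0
  rw [h.1, List.map_map]
  apply List.map_congr_left
  intro q _
  rfl
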